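-- pv_equiv track=rewrite | github.com/mhthies/smarthomeconnect | shc/interfaces/mqtt.py | check_topic_matches_filter
-- ===== SOURCE A (Python) =====
-- import itertools
--
-- def check_topic_matches_filter(topic: str, topic_filter: str) -> bool:
--     """Returns true if the topic matches the topic_filter (which may contain wildcards).
--     It can also be used to check if one topic_filter represents a subset of topics of another filter"""
--     for a, b in itertools.zip_longest(topic.split('/'), topic_filter.split('/'), fillvalue=None):
--         if b == '#':
--             return True
--         if b == '+' and a is not None:
--             continue
--         if a != b:
--             return False
--     return True
-- ===== SOURCE B (Python) =====
-- def check_topic_matches_filter(topic: str, topic_filter: str) -> bool: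
--     """Returns true if the topic matches the topic_filter (which may contain wildcards)."""
--     topic_levels = topic.split('/')
--     filter_levels = topic_filter.split('/')
--     if '#' in filter_levels:
--         idx = filter_levels.index('#')
--         return len(topic_levels) >= idx and all(
--             b == '+' or a == b for a, b in zip(topic_levels, filter_levels[:idx]))
--     return len(topic_levels) == len(filter_levels) and all(
--         b == '+' or a == b for a, b in zip(topic_levels, filter_levels))
-- ===== Notes on version B (the rewrite author's own statement) =====
-- stated objective: idiomatic
-- what changed: Replaces the single zip_longest loop with None sentinels by a '#'-marker detection phase followed by a length check plus an all()-over-zip prefix comparison (two differently shaped checks for the with-# and without-# cases).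
import Mathlib
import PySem

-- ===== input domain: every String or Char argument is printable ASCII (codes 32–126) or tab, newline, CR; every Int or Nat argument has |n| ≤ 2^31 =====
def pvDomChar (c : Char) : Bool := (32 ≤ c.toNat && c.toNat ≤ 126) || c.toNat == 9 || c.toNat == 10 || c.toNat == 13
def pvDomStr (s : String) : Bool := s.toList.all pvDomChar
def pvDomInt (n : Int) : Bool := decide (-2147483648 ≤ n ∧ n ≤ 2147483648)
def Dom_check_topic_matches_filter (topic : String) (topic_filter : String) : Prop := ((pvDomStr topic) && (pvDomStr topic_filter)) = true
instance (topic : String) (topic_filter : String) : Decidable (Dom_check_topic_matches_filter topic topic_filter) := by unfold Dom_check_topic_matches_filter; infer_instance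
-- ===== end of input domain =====

-- B replaces A's single zip_longest-with-None-sentinels loop by '#'-marker detection plus
-- two differently shaped checks (length + prefix zip); objective: idiomatic, same cost.


-- ===== PORT A =====
-- itertools.zip_longest(xs, ys, fillvalue=None) over two string lists
def pvZipLongest : List String → List String → List (Option String × Option String)
  | [], [] => []
  | [], y :: ys => (none, some y) :: pvZipLongest [] ys
  | x :: xs, [] => (some x, none) :: pvZipLongest xs []
  | x :: xs, y :: ys => (some x, some y) :: pvZipLongest xs ys

-- A's for-loop with its early returns, branch for branch
def pvLoopA : List (Option String × Option String) → Bool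
  | [] => true
  | (a, b) :: rest =>
    if b = some "#" then true
    else if b = some "+" ∧ a ≠ none then pvLoopA rest
    else if a = b then pvLoopA rest
    else false

def check_topic_matches_filter (topic : String) (topic_filter : String) : Bool :=
  pvLoopA (pvZipLongest ((PySem.Str.split? topic "/").getD []) ((PySem.Str.split? topic_filter "/").getD []))

-- ===== PORT B =====
-- all(b == '+' or a == b for a, b in zip(ts, fs'))
def pvAllMatch (ps : List (String × String)) : Bool :=
  ps.all (fun p => p.2 == "+" || p.1 == p.2)

def check_topic_matches_filter_alt (topic : String) (topic_filter : String) : Bool :=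
  let ts : List String := (PySem.Str.split? topic "/").getD []
  let fs : List String := (PySem.Str.split? topic_filter "/").getD []
  match PySem.List.index? fs "#" with
  | some idx => decide (ts.length ≥ idx) && pvAllMatch (ts.zip (fs.take idx))
  | none => (ts.length == fs.length) && pvAllMatch (ts.zip fs)

-- ===== PRECONDITION & SPEC =====
def Spec_check_topic_matches_filter (topic : String) (topic_filter : String) (out : Bool) : Prop := out = check_topic_matches_filter_alt topic topic_filter
instance (topic : String) (topic_filter : String) (out : Bool) : Decidable (Spec_check_topic_matches_filter topic topic_filter out) := by unfold Spec_check_topic_matches_filter; infer_instance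

-- ===== CLAIM (what is proved, stated in full; the proofs are below) =====
def Claim_equal_check_topic_matches_filter : Prop := ∀ (topic : String) (topic_filter : String), Dom_check_topic_matches_filter topic topic_filter → Spec_check_topic_matches_filter topic topic_filter (check_topic_matches_filter topic topic_filter)

-- ===== LEMMAS AND PROOFS =====
-- B's core, on the already-split level lists
def pvAltCore (ts fs : List String) : Bool :=
  match PySem.List.index? fs "#" with
  | some idx => decide (ts.length ≥ idx) && pvAllMatch (ts.zip (fs.take idx))
  | none => (ts.length == fs.length) && pvAllMatch (ts.zip fs)

theorem pvLoopA_eq_altCore : ∀ (fs ts : List String),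
    pvLoopA (pvZipLongest ts fs) = pvAltCore ts fs := by
  intro fs
  induction fs with
  | nil =>
    intro ts
    cases ts with
    | nil => simp [pvZipLongest, pvLoopA, pvAltCore, PySem.List.index?, pvAllMatch]
    | cons a ts' => simp [pvZipLongest, pvLoopA, pvAltCore, PySem.List.index?, pvAllMatch]
  | cons f fs' ih =>
    intro ts
    by_cases hf : f = "#"
    · subst hf
      cases ts with
      | nil =>
        unfold pvAltCore
        rw [PySem.List.index?_cons_self]
        simp [pvZipLongest, pvLoopA, pvAllMatch]
      | cons a ts' =>
        unfold pvAltCore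
        rw [PySem.List.index?_cons_self]
        simp [pvZipLongest, pvLoopA, pvAllMatch]
    · have hidx : PySem.List.index? (f :: fs') "#" = (PySem.List.index? fs' "#").map (· + 1) :=
        PySem.List.index?_cons_of_ne fs' hf
      cases ts with
      | nil =>
        have hA : pvLoopA (pvZipLongest [] (f :: fs')) = false := by
          simp [pvZipLongest, pvLoopA, hf]
        rw [hA]
        unfold pvAltCore
        rw [hidx]
        cases h' : PySem.List.index? fs' "#" with
        | none => simp
        | some k => simp
      | cons a ts' =>
        have hstep : pvLoopA (pvZipLongest (a :: ts') (f :: fs')) =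
            ((f == "+" || a == f) && pvLoopA (pvZipLongest ts' fs')) := by
          by_cases hp : f = "+"
          · subst hp; simp [pvZipLongest, pvLoopA]
          · by_cases haf : a = f
            · subst haf; simp [pvZipLongest, pvLoopA, hf, hp]
            · simp [pvZipLongest, pvLoopA, hf, hp, haf]
        rw [hstep, ih ts']
        unfold pvAltCore
        rw [hidx]
        cases h' : PySem.List.index? fs' "#" with
        | none =>
          simp [pvAllMatch, List.zip_cons_cons, Bool.and_left_comm]
        | some k =>
          simp only [Option.map_some]
          simp [pvAllMatch, List.zip_cons_cons, List.take_succ_cons, Bool.and_left_comm]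

-- ===== VERDICT (by name: the statement is the Claim_ definition above) =====
theorem check_topic_matches_filter_spec : Claim_equal_check_topic_matches_filter := by
  intro topic topic_filter _
  unfold Spec_check_topic_matches_filter check_topic_matches_filter check_topic_matches_filter_alt
  exact pvLoopA_eq_altCore _ _
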